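-- pv_equiv track=rewrite | github.com/chhzh123/heterocl-demo | bnn/lab5775/bnn_vhls.py | add_array_partition
-- ===== SOURCE A (Python) =====
-- def add_array_partition(f):
-- 	res_f = ""
-- 	lines = f.split("\n")
-- 	for i,line in enumerate(lines):
-- 		if "default_function" in line:
-- 			break
-- 	pragmas = []
-- 	for var in ["input_image",
-- 				"w_conv1","bn_t1",
-- 				"w_conv2","bn_t2",
-- 				"w_fc1","b_fc1",
-- 				"w_fc2","b_fc2",
-- 				"fc2"]:
-- 		if var not in ["b_fc2","fc2"]:
-- 			pragmas.append("#pragma HLS array_partition variable={} block factor=8 dim=1".format(var))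
-- 		else:
-- 			pragmas.append("#pragma HLS array_partition variable={} complete dim=1".format(var))
-- 	lines = lines[:i+1] + pragmas + lines[i+1:]
-- 	res_f += "\n".join(lines)
-- 	return res_f
-- ===== SOURCE B (Python) =====
-- # One-pass rewrite: stream the lines once with an "inserted" flag and a single
-- # precomputed pragma block, instead of an index search plus list slicing.
-- PRAGMAS = "\n".join(
--     ["#pragma HLS array_partition variable=%s block factor=8 dim=1" % v
--      for v in ["input_image", "w_conv1", "bn_t1", "w_conv2", "bn_t2",
--                "w_fc1", "b_fc1", "w_fc2"]]
--     + ["#pragma HLS array_partition variable=%s complete dim=1" % v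
--        for v in ["b_fc2", "fc2"]]
-- )
--
--
-- def add_array_partition(f):
--     out = []
--     inserted = False
--     for line in f.split("\n"):
--         out.append(line)
--         if not inserted and "default_function" in line:
--             out.append(PRAGMAS)
--             inserted = True
--     if not inserted:
--         out.append(PRAGMAS)
--     return "\n".join(out)
-- ===== Notes on version B (the rewrite author's own statement) =====
-- stated objective: simpler
-- what changed: Replaces the index search over lines plus list slicing/concatenation (and the per-variable pragma-building loop) with a single streaming pass over the lines that appends each line and splices in one precomputed pragma block after the first marker line (or at the end).
import Mathlib
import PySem

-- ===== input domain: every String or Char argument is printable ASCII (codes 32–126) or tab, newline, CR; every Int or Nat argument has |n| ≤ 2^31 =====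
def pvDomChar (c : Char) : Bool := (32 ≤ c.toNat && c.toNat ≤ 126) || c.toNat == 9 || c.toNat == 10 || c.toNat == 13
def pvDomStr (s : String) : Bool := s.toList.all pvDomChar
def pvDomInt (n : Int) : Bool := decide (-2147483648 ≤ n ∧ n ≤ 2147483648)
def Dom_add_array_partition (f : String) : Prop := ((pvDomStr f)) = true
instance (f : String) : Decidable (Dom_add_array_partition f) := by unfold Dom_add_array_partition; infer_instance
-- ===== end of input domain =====

-- B rewrites A's index-search-plus-slice insertion as a single streaming pass with an
-- "inserted" flag and one precomputed pragma block (objective: simpler; same cost).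

-- ===== PORT A =====
-- Python's `for i, line in enumerate(lines): if "default_function" in line: break`:
-- i is the index of the first matching line, else the last index (the [] case is
-- unreachable: f.split("\n") is never empty).
def pvFindMark : List String → Nat
  | [] => 0
  | [_] => 0          -- with one line left, break and loop exhaustion both leave i at the last index, 0 here
  | l :: rest =>
    if PySem.Str.isIn "default_function" l then 0 else pvFindMark rest + 1

def add_array_partition (f : String) : String :=
  let res_f : String := ""
  -- sep "\n" ≠ "", so split? is always `some`
  let lines := (PySem.Str.split? f "\n").getD []
  let i := pvFindMark lines
  let pragmas := (["input_image", "w_conv1", "bn_t1", "w_conv2", "bn_t2",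
                   "w_fc1", "b_fc1", "w_fc2", "b_fc2", "fc2"] : List String).foldl
    (fun acc var =>
      if ¬ (var ∈ (["b_fc2", "fc2"] : List String)) then
        acc ++ ["#pragma HLS array_partition variable=" ++ var ++ " block factor=8 dim=1"]
      else
        acc ++ ["#pragma HLS array_partition variable=" ++ var ++ " complete dim=1"]) []
  let lines2 := PySem.List.slice lines none (some ((i : Int) + 1)) ++ pragmas
                  ++ PySem.List.slice lines (some ((i : Int) + 1)) none
  res_f ++ PySem.Str.join "\n" lines2

-- ===== PORT B =====
def pvPragmas : String :=
  PySem.Str.join "\n"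
    ((["input_image", "w_conv1", "bn_t1", "w_conv2", "bn_t2",
       "w_fc1", "b_fc1", "w_fc2"] : List String).map
        (fun v => "#pragma HLS array_partition variable=" ++ v ++ " block factor=8 dim=1")
      ++ (["b_fc2", "fc2"] : List String).map
          (fun v => "#pragma HLS array_partition variable=" ++ v ++ " complete dim=1"))

def pvStepB (st : List String × Bool) (line : String) : List String × Bool :=
  if st.2 then (st.1 ++ [line], st.2)
  else if PySem.Str.isIn "default_function" line then (st.1 ++ [line, pvPragmas], true)
  else (st.1 ++ [line], st.2)

def add_array_partition_alt (f : String) : String :=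
  let r := ((PySem.Str.split? f "\n").getD []).foldl pvStepB ([], false)
  PySem.Str.join "\n" (if r.2 then r.1 else r.1 ++ [pvPragmas])

-- ===== PRECONDITION & SPEC =====
def Spec_add_array_partition (f : String) (out : String) : Prop := out = add_array_partition_alt f
instance (f : String) (out : String) : Decidable (Spec_add_array_partition f out) := by unfold Spec_add_array_partition; infer_instance

-- ===== CLAIM (what is proved, stated in full; the proofs are below) =====
def Claim_equal_add_array_partition : Prop := ∀ (f : String), Dom_add_array_partition f → Spec_add_array_partition f (add_array_partition f)

-- ===== LEMMAS AND PROOFS =====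

-- the value A's pragma-building loop produces, as a literal list
def pvPragmaList : List String :=
  ["#pragma HLS array_partition variable=input_image block factor=8 dim=1",
   "#pragma HLS array_partition variable=w_conv1 block factor=8 dim=1",
   "#pragma HLS array_partition variable=bn_t1 block factor=8 dim=1",
   "#pragma HLS array_partition variable=w_conv2 block factor=8 dim=1",
   "#pragma HLS array_partition variable=bn_t2 block factor=8 dim=1",
   "#pragma HLS array_partition variable=w_fc1 block factor=8 dim=1",
   "#pragma HLS array_partition variable=b_fc1 block factor=8 dim=1",
   "#pragma HLS array_partition variable=w_fc2 block factor=8 dim=1",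
   "#pragma HLS array_partition variable=b_fc2 complete dim=1",
   "#pragma HLS array_partition variable=fc2 complete dim=1"]

-- the line list both programs produce, abstractly: each line, with the pragma block
-- inserted after the first marker line, or appended at the end when no line matches
def pvSpecIns : List String → List String
  | [] => [pvPragmas]
  | l :: rest =>
    if PySem.Str.isIn "default_function" l then l :: pvPragmas :: rest
    else l :: pvSpecIns rest

theorem pvFoldB_true (ls : List String) (acc : List String) :
    ls.foldl pvStepB (acc, true) = (acc ++ ls, true) := by
  induction ls generalizing acc with
  | nil => simp
  | cons l rest ih => simp [List.foldl, pvStepB, ih]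

theorem pvFoldB_false (ls : List String) (acc : List String) :
    (if (ls.foldl pvStepB (acc, false)).2 then (ls.foldl pvStepB (acc, false)).1
     else (ls.foldl pvStepB (acc, false)).1 ++ [pvPragmas]) = acc ++ pvSpecIns ls := by
  induction ls generalizing acc with
  | nil => simp [pvSpecIns]
  | cons l rest ih =>
    simp only [List.foldl]
    by_cases h : PySem.Str.isIn "default_function" l = true <;> simp at h
    · have hs : pvStepB (acc, false) l = (acc ++ [l, pvPragmas], true) := by
        simp [pvStepB, h]
      rw [hs, pvFoldB_true]
      simp [pvSpecIns, h]
    · have hs : pvStepB (acc, false) l = (acc ++ [l], false) := by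
        simp [pvStepB, h]
      rw [hs, ih]
      simp [pvSpecIns, h]

theorem pvTakeDrop (ls : List String) :
    ls.take (pvFindMark ls + 1) ++ [pvPragmas] ++ ls.drop (pvFindMark ls + 1)
      = pvSpecIns ls := by
  induction ls with
  | nil => simp [pvFindMark, pvSpecIns]
  | cons l rest ih =>
    cases rest with
    | nil =>
      by_cases h : PySem.Str.isIn "default_function" l = true <;> simp at h <;>
        simp [pvFindMark, pvSpecIns, h]
    | cons r rs =>
      by_cases h : PySem.Str.isIn "default_function" l = true <;> simp at h
      · simp [pvFindMark, pvSpecIns, h]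
      · show List.take (pvFindMark (l :: r :: rs) + 1) (l :: r :: rs) ++ [pvPragmas]
            ++ List.drop (pvFindMark (l :: r :: rs) + 1) (l :: r :: rs) = pvSpecIns (l :: r :: rs)
        have hf : pvFindMark (l :: r :: rs) = pvFindMark (r :: rs) + 1 := by
          simp [pvFindMark, h]
        rw [hf]
        simp only [List.take_succ_cons, List.drop_succ_cons, List.cons_append,
          List.append_assoc] at ih ⊢
        exact (congrArg (List.cons l) ih).trans (by simp [pvSpecIns, h])

theorem pvJoinAppendNe (sep : List Char) (as bs : List (List Char))
    (ha : as ≠ []) (hb : bs ≠ []) :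
    PySem.Chars.join sep (as ++ bs)
      = PySem.Chars.join sep as ++ sep ++ PySem.Chars.join sep bs := by
  induction as with
  | nil => exact absurd rfl ha
  | cons a as' ih =>
    cases as' with
    | nil =>
      cases bs with
      | nil => exact absurd rfl hb
      | cons b bs' => simp [PySem.Chars.join_cons_cons, PySem.Chars.join_singleton]
    | cons a' as'' =>
      simp only [List.cons_append, PySem.Chars.join_cons_cons]
      have h2 := ih (by simp)
      simp only [List.cons_append] at h2
      rw [h2]
      simp [List.append_assoc]

theorem pvJoinMid (sep : List Char) (xs ys ps : List (List Char)) (hp : ps ≠ []) :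
    PySem.Chars.join sep (xs ++ ps ++ ys)
      = PySem.Chars.join sep (xs ++ [PySem.Chars.join sep ps] ++ ys) := by
  cases xs with
  | nil =>
    cases ys with
    | nil => simp [PySem.Chars.join_singleton]
    | cons y ys' =>
      simp only [List.nil_append]
      rw [pvJoinAppendNe sep ps (y :: ys') hp (by simp),
          pvJoinAppendNe sep [PySem.Chars.join sep ps] (y :: ys') (by simp) (by simp),
          PySem.Chars.join_singleton]
  | cons x xs' =>
    cases ys with
    | nil =>
      simp only [List.append_nil]
      rw [pvJoinAppendNe sep (x :: xs') ps (by simp) hp,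
          pvJoinAppendNe sep (x :: xs') [PySem.Chars.join sep ps] (by simp) (by simp),
          PySem.Chars.join_singleton]
    | cons y ys' =>
      rw [List.append_assoc, List.append_assoc,
          pvJoinAppendNe sep (x :: xs') (ps ++ y :: ys') (by simp) (by simp [hp]),
          pvJoinAppendNe sep ps (y :: ys') hp (by simp),
          pvJoinAppendNe sep (x :: xs') ([PySem.Chars.join sep ps] ++ y :: ys') (by simp) (by simp),
          pvJoinAppendNe sep [PySem.Chars.join sep ps] (y :: ys') (by simp) (by simp),
          PySem.Chars.join_singleton]

theorem pvJoinCollapse (xs ys ps : List String) (hne : ps ≠ [])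
    (h : PySem.Str.join "\n" ps = pvPragmas) :
    PySem.Str.join "\n" (xs ++ ps ++ ys)
      = PySem.Str.join "\n" (xs ++ [pvPragmas] ++ ys) := by
  apply String.toList_inj.mp
  rw [PySem.Str.toList_join, PySem.Str.toList_join]
  simp only [List.map_append, List.map_cons, List.map_nil]
  rw [pvJoinMid "\n".toList (xs.map String.toList) (ys.map String.toList)
        (ps.map String.toList) (by simp [hne])]
  have hj : PySem.Chars.join "\n".toList (ps.map String.toList) = pvPragmas.toList := by
    rw [← PySem.Str.toList_join, h]
  rw [hj]

theorem pvPragmaList_ne_nil : pvPragmaList ≠ [] := by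
  unfold pvPragmaList; simp

set_option maxRecDepth 8000 in
theorem pvFoldPrag :
    (["input_image", "w_conv1", "bn_t1", "w_conv2", "bn_t2",
      "w_fc1", "b_fc1", "w_fc2", "b_fc2", "fc2"] : List String).foldl
    (fun acc var =>
      if ¬ (var ∈ (["b_fc2", "fc2"] : List String)) then
        acc ++ ["#pragma HLS array_partition variable=" ++ var ++ " block factor=8 dim=1"]
      else
        acc ++ ["#pragma HLS array_partition variable=" ++ var ++ " complete dim=1"]) []
     = pvPragmaList := by decide

theorem pvPragmaListEq : PySem.Str.join "\n" pvPragmaList = pvPragmas := by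
  unfold pvPragmas
  congr 1

-- ===== VERDICT (by name: the statement is the Claim_ definition above) =====
theorem add_array_partition_spec : Claim_equal_add_array_partition := by
  intro f _
  show add_array_partition f = add_array_partition_alt f
  have hA : add_array_partition f =
      PySem.Str.join "\n"
        (PySem.List.slice ((PySem.Str.split? f "\n").getD []) none
            (some ((pvFindMark ((PySem.Str.split? f "\n").getD []) : Int) + 1))
          ++ pvPragmaList
          ++ PySem.List.slice ((PySem.Str.split? f "\n").getD [])
            (some ((pvFindMark ((PySem.Str.split? f "\n").getD []) : Int) + 1)) none) := by
    dsimp only [add_array_partition]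
    rw [pvFoldPrag]
    simp
  have hB : add_array_partition_alt f =
      PySem.Str.join "\n"
        (if (((PySem.Str.split? f "\n").getD []).foldl pvStepB ([], false)).2 then
            (((PySem.Str.split? f "\n").getD []).foldl pvStepB ([], false)).1
          else (((PySem.Str.split? f "\n").getD []).foldl pvStepB ([], false)).1 ++ [pvPragmas]) := by
    dsimp only [add_array_partition_alt]
  rw [hA, hB]
  set ls := (PySem.Str.split? f "\n").getD [] with hls
  set i := pvFindMark ls with hi
  rw [PySem.List.slice_to ls (b := (i : Int) + 1) (by positivity),
      PySem.List.slice_from ls (a := (i : Int) + 1) (by positivity)]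
  have hcast : ((i : Int) + 1).toNat = i + 1 := by omega
  rw [hcast]
  rw [pvJoinCollapse (ls.take (i + 1)) (ls.drop (i + 1)) pvPragmaList
        pvPragmaList_ne_nil pvPragmaListEq]
  rw [pvTakeDrop ls]
  have hfb := pvFoldB_false ls []
  simp only [List.nil_append] at hfb
  rw [← hfb]
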